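-- pv_equiv track=rewrite | github.com/Nghia03092004/nghia03092004.github.io | project_euler_unified/problem_463/solution.py | compute_f_brute
-- ===== SOURCE A (Python) =====
-- def compute_f_brute(N: int) -> list:
--     """Compute f(1..N) directly."""
--     f = [0] * (N + 1)
--     f[1] = 1
--     if N >= 3:
--         f[3] = 3
--     for n in range(2, N + 1):
--         if f[n] != 0:
--             continue
--         if n % 2 == 0:
--             f[n] = f[n // 2]
--         elif n % 4 == 1:
--             k = (n - 1) // 4
--             f[n] = 2 * f[2 * k + 1] - f[k]
--         else:  # n % 4 == 3
--             k = (n - 3) // 4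
--             f[n] = 3 * f[2 * k + 1] - 2 * f[k]
--     return f
-- ===== SOURCE B (Python) =====
-- def compute_f_brute(N: int) -> list:
--     """Compute f(1..N) via top-down memoized recursion on the same recurrence."""
--     memo = {0: 0, 1: 1}
--
--     def g(n):
--         if n in memo:
--             return memo[n]
--         if n % 2 == 0:
--             v = g(n // 2)
--         elif n % 4 == 1:
--             k = (n - 1) // 4
--             v = 2 * g(2 * k + 1) - g(k)
--         else:  # n % 4 == 3
--             k = (n - 3) // 4
--             v = 3 * g(2 * k + 1) - 2 * g(k)
--         memo[n] = v
--         return v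
--
--     f = [0] * (N + 1)
--     f[1] = 1
--     for n in range(2, N + 1):
--         f[n] = g(n)
--     return f
-- ===== Notes on version B (the rewrite author's own statement) =====
-- stated objective: alternative
-- what changed: Replaces A's bottom-up table filling, with its seeded special case and nonzero guard, by a top-down memoized recursive helper g implementing the bare recurrence (base cases plus the even and odd mod-four cases) and writing f[n]=g(n) in the output loop.
-- outside the precondition, e.g. on compute_f_brute(0): A raises IndexError, B raises IndexError
import Mathlib
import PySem

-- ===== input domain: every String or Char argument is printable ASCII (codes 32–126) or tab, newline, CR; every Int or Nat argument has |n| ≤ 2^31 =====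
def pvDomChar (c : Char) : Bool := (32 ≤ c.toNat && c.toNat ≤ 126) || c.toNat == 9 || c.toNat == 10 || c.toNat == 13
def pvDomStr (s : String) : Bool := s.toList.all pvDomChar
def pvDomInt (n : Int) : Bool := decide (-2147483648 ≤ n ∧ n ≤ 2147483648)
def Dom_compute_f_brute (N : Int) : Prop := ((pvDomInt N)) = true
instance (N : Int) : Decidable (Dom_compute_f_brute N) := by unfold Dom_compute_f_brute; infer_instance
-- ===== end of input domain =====

-- B changes the decomposition: the same recurrence is evaluated by a top-down memoized
-- recursive helper instead of A's bottom-up table filling with its seeded special case and nonzero guard.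

-- ===== PORT A =====
-- A's loop body, as a named helper (the fold below applies it to each n of range(2, N+1)).
def pvStepA (f : List Int) (n : Int) : List Int :=
  if PySem.List.pyGetD f n 0 ≠ 0 then f
  else if PySem.Int.mod n 2 = 0 then
    PySem.List.pySetD f n (PySem.List.pyGetD f (PySem.Int.floordiv n 2) 0)
  else if PySem.Int.mod n 4 = 1 then
    PySem.List.pySetD f n (2 * PySem.List.pyGetD f (2 * PySem.Int.floordiv (n - 1) 4 + 1) 0
      - PySem.List.pyGetD f (PySem.Int.floordiv (n - 1) 4) 0)
  else
    PySem.List.pySetD f n (3 * PySem.List.pyGetD f (2 * PySem.Int.floordiv (n - 3) 4 + 1) 0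
      - 2 * PySem.List.pyGetD f (PySem.Int.floordiv (n - 3) 4) 0)

def compute_f_brute (N : Int) : List Int :=
  let f := PySem.List.pyRepeat [(0 : Int)] (N + 1)
  let f := PySem.List.pySetD f 1 1
  let f := if N ≥ 3 then PySem.List.pySetD f 3 3 else f
  (PySem.List.pyRange 2 (N + 1) 1).foldl pvStepA f

-- ===== PORT B =====
-- B's recursive helper g; every Python call site passes a nonnegative n, so it lives on Nat.
-- (The Python memo dict is a pure-speed device; the recursion computes the same values.)
def pvG (n : Nat) : Int :=
  if n ≤ 1 then (n : Int)
  else if n % 2 = 0 then pvG (n / 2)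
  else if n % 4 = 1 then
    let k := (n - 1) / 4
    2 * pvG (2 * k + 1) - pvG k
  else
    let k := (n - 3) / 4
    3 * pvG (2 * k + 1) - 2 * pvG k
termination_by n
decreasing_by all_goals omega

def compute_f_brute_alt (N : Int) : List Int :=
  let f := PySem.List.pyRepeat [(0 : Int)] (N + 1)
  let f := PySem.List.pySetD f 1 1
  -- each n drawn from range(2, N+1) is ≥ 2, so n.toNat is exact
  (PySem.List.pyRange 2 (N + 1) 1).foldl (fun f n => PySem.List.pySetD f n (pvG n.toNat)) f

-- ===== PRECONDITION & SPEC =====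
-- Pre_ excludes nonpositive N, where A raises IndexError assigning the first f entry (and B raises the same way).
def Pre_compute_f_brute (N : Int) : Prop := 1 ≤ N
instance (N : Int) : Decidable (Pre_compute_f_brute N) := by unfold Pre_compute_f_brute; infer_instance
def pvWitness_compute_f_brute : Int := (5)

def Spec_compute_f_brute (N : Int) (out : List Int) : Prop := out = compute_f_brute_alt N
instance (N : Int) (out : List Int) : Decidable (Spec_compute_f_brute N out) := by unfold Spec_compute_f_brute; infer_instance

-- ===== CLAIM (what is proved, stated in full; the proofs are below) =====
def Claim_equal_compute_f_brute : Prop := ∀ (N : Int), Dom_compute_f_brute N → Pre_compute_f_brute N → Spec_compute_f_brute N (compute_f_brute N)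

-- ===== LEMMAS AND PROOFS =====

theorem pvG_zero : pvG 0 = 0 := by simp [pvG]
theorem pvG_one : pvG 1 = 1 := by simp [pvG]
theorem pvG_three : pvG 3 = 3 := by
  rw [pvG]; norm_num; rw [pvG, pvG]; norm_num

-- A's preset table values at positions not yet overwritten by the loop.
def pvPreA (L i : Nat) : Int := if i = 1 then 1 else if i = 3 ∧ 3 < L then 3 else 0
-- B's preset table values.
def pvPreB (i : Nat) : Int := if i = 1 then 1 else 0

def pvInv (pre : Nat → Int) (L m : Nat) (F : List Int) : Prop :=
  F.length = L ∧ ∀ i, i < L → F.getD i 0 = if i < m then pvG i else pre i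

theorem pvGetD_of_inv {pre : Nat → Int} {L m : Nat} {F : List Int}
    (hI : pvInv pre L m F) (j : Nat) (hj : j < m) (hjL : j < L) :
    PySem.List.pyGetD F (j : Int) 0 = pvG j := by
  obtain ⟨hlen, hval⟩ := hI
  rw [PySem.List.pyGetD_natCast, hval j hjL, if_pos hj]

theorem pvInv_set {pre : Nat → Int} {L m : Nat} {F : List Int}
    (hm : m < L) (hI : pvInv pre L m F) :
    pvInv pre L (m + 1) (PySem.List.pySetD F (m : Int) (pvG m)) := by
  obtain ⟨hlen, hval⟩ := hI
  refine ⟨by simp [hlen], ?_⟩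
  intro i hi
  simp only [PySem.List.pySetD_natCast]
  rw [List.getD_eq_getElem?_getD, List.getElem?_set]
  by_cases him : m = i
  · subst him
    rw [if_pos rfl, if_pos (by omega)]
    simp
  · rw [if_neg him, ← List.getD_eq_getElem?_getD, hval i hi]
    have : (i < m) ↔ (i < m + 1) := by omega
    simp [this]

theorem pvInv_skip {pre : Nat → Int} {L m : Nat} {F : List Int}
    (hm : m < L) (hI : pvInv pre L m F) (hg : pre m = pvG m) :
    pvInv pre L (m + 1) F := by
  obtain ⟨hlen, hval⟩ := hI
  refine ⟨hlen, ?_⟩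
  intro i hi
  rw [hval i hi]
  rcases Nat.lt_trichotomy i m with h | h | h
  · simp [h, Nat.lt_succ_of_lt h]
  · subst h; simp [hg]
  · have h1 : ¬ i < m := by omega
    have h2 : ¬ i < m + 1 := by omega
    simp [h1, h2]

theorem pvStepA_inv {L m : Nat} {F : List Int} (h2 : 2 ≤ m) (hm : m < L)
    (hI : pvInv (pvPreA L) L m F) : pvInv (pvPreA L) L (m + 1) (pvStepA F (m : Int)) := by
  have hgm : PySem.List.pyGetD F (m : Int) 0 = pvPreA L m := by
    obtain ⟨hlen, hval⟩ := hI
    rw [PySem.List.pyGetD_natCast, hval m hm, if_neg (by omega)]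
  by_cases h3 : m = 3 ∧ 3 < L
  · -- seeded f[3] = 3: the guard fires and the list is unchanged; pvG 3 = 3
    have hnz : pvPreA L m ≠ 0 := by
      simp only [pvPreA]; rw [if_neg (by omega), if_pos h3]; norm_num
    rw [pvStepA, if_pos (by rw [hgm]; exact hnz)]
    refine pvInv_skip hm hI ?_
    simp only [pvPreA]; rw [if_neg (by omega), if_pos h3, h3.1, pvG_three]
  · have hz : pvPreA L m = 0 := by
      simp only [pvPreA]; rw [if_neg (by omega), if_neg h3]
    have hm2 : PySem.Int.mod (m : Int) 2 = ((m % 2 : Nat) : Int) := by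
      rw [show (2 : Int) = ((2 : Nat) : Int) by norm_num, PySem.Int.mod_natCast]
    have hm4 : PySem.Int.mod (m : Int) 4 = ((m % 4 : Nat) : Int) := by
      rw [show (4 : Int) = ((4 : Nat) : Int) by norm_num, PySem.Int.mod_natCast]
    rw [pvStepA, if_neg (by rw [hgm, hz]; simp)]
    by_cases hev : m % 2 = 0
    · rw [if_pos (by rw [hm2, hev]; norm_num)]
      have hd : PySem.Int.floordiv (m : Int) 2 = ((m / 2 : Nat) : Int) := by
        rw [show (2 : Int) = ((2 : Nat) : Int) by norm_num, PySem.Int.floordiv_natCast]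
      rw [hd, pvGetD_of_inv hI (m / 2) (by omega) (by omega)]
      have : pvG (m / 2) = pvG m := by
        conv_rhs => rw [pvG]
        rw [if_neg (by omega), if_pos hev]
      rw [this]
      exact pvInv_set hm hI
    · rw [if_neg (by rw [hm2]; omega)]
      by_cases h41 : m % 4 = 1
      · rw [if_pos (by rw [hm4, h41]; norm_num)]
        have hk : PySem.Int.floordiv ((m : Int) - 1) 4 = (((m - 1) / 4 : Nat) : Int) := by
          rw [show ((m : Int) - 1) = (((m - 1 : Nat)) : Int) by omega,
              show (4 : Int) = ((4 : Nat) : Int) by norm_num, PySem.Int.floordiv_natCast]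
        have h2k : (2 : Int) * ((((m - 1) / 4 : Nat)) : Int) + 1
            = (((2 * ((m - 1) / 4) + 1 : Nat)) : Int) := by push_cast; ring
        rw [hk, h2k, pvGetD_of_inv hI (2 * ((m - 1) / 4) + 1) (by omega) (by omega),
            pvGetD_of_inv hI ((m - 1) / 4) (by omega) (by omega)]
        have : 2 * pvG (2 * ((m - 1) / 4) + 1) - pvG ((m - 1) / 4) = pvG m := by
          conv_rhs => rw [pvG]
          rw [if_neg (by omega), if_neg hev, if_pos h41]
        rw [this]
        exact pvInv_set hm hI
      · have h43 : m % 4 = 3 := by omega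
        rw [if_neg (by rw [hm4, h43]; norm_num)]
        have hk : PySem.Int.floordiv ((m : Int) - 3) 4 = (((m - 3) / 4 : Nat) : Int) := by
          rw [show ((m : Int) - 3) = (((m - 3 : Nat)) : Int) by omega,
              show (4 : Int) = ((4 : Nat) : Int) by norm_num, PySem.Int.floordiv_natCast]
        have h2k : (2 : Int) * ((((m - 3) / 4 : Nat)) : Int) + 1
            = (((2 * ((m - 3) / 4) + 1 : Nat)) : Int) := by push_cast; ring
        rw [hk, h2k, pvGetD_of_inv hI (2 * ((m - 3) / 4) + 1) (by omega) (by omega),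
            pvGetD_of_inv hI ((m - 3) / 4) (by omega) (by omega)]
        have : 3 * pvG (2 * ((m - 3) / 4) + 1) - 2 * pvG ((m - 3) / 4) = pvG m := by
          conv_rhs => rw [pvG]
          rw [if_neg (by omega), if_neg hev, if_neg (by omega)]
        rw [this]
        exact pvInv_set hm hI

theorem pvFoldA_inv (L : Nat) : ∀ (c m : Nat) (F : List Int), m + c = L → 2 ≤ m →
    pvInv (pvPreA L) L m F →
    pvInv (pvPreA L) L L ((PySem.List.pyRange (m : Int) (L : Int) 1).foldl pvStepA F) := by
  intro c
  induction c with
  | zero =>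
    intro m F hmc _ hI
    have hmL : m = L := by omega
    subst hmL
    rw [PySem.List.pyRange_one_eq_nil (le_refl _)]
    exact hI
  | succ c ih =>
    intro m F hmc h2 hI
    rw [PySem.List.pyRange_one_cons (by omega : (m : Int) < (L : Int))]
    simp only [List.foldl_cons]
    have : ((m : Int) + 1) = (((m + 1 : Nat)) : Int) := by push_cast; ring
    rw [this]
    exact ih (m + 1) _ (by omega) (by omega) (pvStepA_inv h2 (by omega) hI)

theorem pvFoldB_inv (L : Nat) : ∀ (c m : Nat) (F : List Int), m + c = L → 2 ≤ m →
    pvInv pvPreB L m F →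
    pvInv pvPreB L L ((PySem.List.pyRange (m : Int) (L : Int) 1).foldl
      (fun f n => PySem.List.pySetD f n (pvG n.toNat)) F) := by
  intro c
  induction c with
  | zero =>
    intro m F hmc _ hI
    have hmL : m = L := by omega
    subst hmL
    rw [PySem.List.pyRange_one_eq_nil (le_refl _)]
    exact hI
  | succ c ih =>
    intro m F hmc h2 hI
    rw [PySem.List.pyRange_one_cons (by omega : (m : Int) < (L : Int))]
    simp only [List.foldl_cons]
    have h1 : ((m : Int) + 1) = (((m + 1 : Nat)) : Int) := by push_cast; ring
    have h0 : ((m : Int)).toNat = m := by omega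
    rw [h1, h0]
    exact ih (m + 1) _ (by omega) (by omega) (pvInv_set (by omega) hI)

theorem pvInv_eq {L : Nat} {F G : List Int} (hF : pvInv (pvPreA L) L L F)
    (hG : pvInv pvPreB L L G) : F = G := by
  obtain ⟨hFl, hFv⟩ := hF
  obtain ⟨hGl, hGv⟩ := hG
  apply List.ext_getElem (by omega)
  intro i h1 h2
  have hF := hFv i (by omega)
  have hG := hGv i (by omega)
  rw [List.getD_eq_getElem?_getD, List.getElem?_eq_getElem h1] at hF
  rw [List.getD_eq_getElem?_getD, List.getElem?_eq_getElem h2] at hG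
  simp only [Option.getD_some] at hF hG
  rw [hF, hG, if_pos (show i < L by omega), if_pos (show i < L by omega)]

theorem compute_f_brute_spec : Claim_equal_compute_f_brute := by
  intro N _ hpre
  unfold Spec_compute_f_brute compute_f_brute compute_f_brute_alt
  have hpre : (1 : Int) ≤ N := hpre
  set L : Nat := (N + 1).toNat with hL
  have hNL : N + 1 = (L : Int) := by omega
  have hL2 : 2 ≤ L := by omega
  have hrep : PySem.List.pyRepeat [(0 : Int)] ((L : Nat) : Int) = List.replicate L (0 : Int) := by
    rw [PySem.List.pyRepeat_singleton]
    simp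
  have hset1 : ∀ xs : List Int, PySem.List.pySetD xs (1 : Int) 1 = xs.set 1 1 := by
    intro xs
    rw [show (1 : Int) = ((1 : Nat) : Int) by norm_num, PySem.List.pySetD_natCast]
  have hset3 : ∀ xs : List Int, PySem.List.pySetD xs (3 : Int) 3 = xs.set 3 3 := by
    intro xs
    rw [show (3 : Int) = ((3 : Nat) : Int) by norm_num, PySem.List.pySetD_natCast]
  simp only [hNL, hrep, hset1, hset3]
  have hpreA1 : pvPreA L 1 = 1 := by simp [pvPreA]
  have hIA : pvInv (pvPreA L) L 2
      (if N ≥ 3 then ((List.replicate L (0 : Int)).set 1 1).set 3 3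
       else (List.replicate L (0 : Int)).set 1 1) := by
    have hN3 : N ≥ 3 ↔ 3 < L := by omega
    have hget : ∀ (xs : List Int) (j : Nat) (v : Int) (i : Nat), i < xs.length →
        (xs.set j v).getD i 0 = if j = i then v else xs.getD i 0 := by
      intro xs j v i hi
      rw [List.getD_eq_getElem?_getD, List.getElem?_set]
      by_cases hji : j = i
      · subst hji; rw [if_pos rfl, if_pos hi]; simp
      · rw [if_neg hji, ← List.getD_eq_getElem?_getD, if_neg hji]
    have hrep : ∀ i : Nat, i < L → (List.replicate L (0 : Int)).getD i 0 = 0 := by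
      intro i hi
      rw [List.getD_eq_getElem?_getD, List.getElem?_eq_getElem (by simpa using hi)]
      simp
    split_ifs with h
    · refine ⟨by simp, ?_⟩
      intro i hi
      rw [hget _ _ _ _ (by simpa using hi), hget _ _ _ _ (by simpa using hi)]
      by_cases h0 : i = 0
      · subst h0; simp [pvG_zero]
      by_cases h1 : i = 1
      · subst h1; simp [pvG_one]
      by_cases h3 : i = 3
      · subst h3
        rw [if_pos rfl, if_neg (by omega)]
        simp [pvPreA, hN3.mp h]
      · rw [if_neg (by omega), if_neg (by omega), if_neg (by omega), hrep i hi]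
        simp [pvPreA, h1, h3]
    · refine ⟨by simp, ?_⟩
      intro i hi
      have hL3 : ¬ 3 < L := by omega
      rw [hget _ _ _ _ (by simpa using hi)]
      by_cases h0 : i = 0
      · subst h0; simp [pvG_zero]
      by_cases h1 : i = 1
      · subst h1; simp [pvG_one]
      · rw [if_neg (by omega), if_neg (by omega), hrep i hi]
        simp [pvPreA, h1, hL3]
  have hIB : pvInv pvPreB L 2 ((List.replicate L (0 : Int)).set 1 1) := by
    refine ⟨by simp, ?_⟩
    intro i hi
    rw [List.getD_eq_getElem?_getD, List.getElem?_set]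
    by_cases h1 : i = 1
    · subst h1
      rw [if_pos rfl, if_pos (by simpa using hi)]
      simp [pvG_one]
    · rw [if_neg (by omega), List.getElem?_replicate, if_pos (by simpa using hi)]
      by_cases h0 : i = 0
      · subst h0; simp [pvG_zero]
      · simp [pvPreB, h1]
        omega
  have h2cast : (2 : Int) = (((2 : Nat)) : Int) := by norm_num
  rw [h2cast]
  exact pvInv_eq
    (pvFoldA_inv L (L - 2) 2 _ (by omega) (by omega) hIA)
    (pvFoldB_inv L (L - 2) 2 _ (by omega) (by omega) hIB)
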